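-- pv_equiv track=rewrite | github.com/maxtyson123/COSC122 | labs/lab0/doc_testing.py | has_123
-- ===== SOURCE A (Python) =====
-- def has_123(nums):
--     """ You should remember this fun function from 121/131 :)
--     Returns true if the numbers 1, 2 and 3 appear one after
--     the other anywhere in the list of numbers.
--     You should be able to write code that passes the tests but isn't completely correct...
--     Can you think of some test cases that would catch such erroneous code?
--     For example:
--     >>> has_123([1, 2, 3])
--     True
--     >>> has_123([1, 2, 31])
--     False
--     >>> has_123([4, 3, 1, 2, 3])
--     True
--     >>> has_123([4, 3, 1, 2, 2])
--     False
--     >>> has_123([4, 1, 2, 3, 2])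
--     True
--     """
--     start = 1
--     end = 3
--     space_needed = end - start + 1
--
--     for index, number in enumerate(nums):
--
--         # Find the potential start of the chain
--         if number != start:
--             continue
--
--         # Cant fit the range
--         if index + space_needed > len(nums):
--             continue
--
--         valid = True
--         for check_index, check  in enumerate(range(start, end + 1)):
--             valid = valid and check == nums[index + check_index]
--
--         if valid:
--             return valid
--
--     return False
-- ===== SOURCE B (Python) =====
-- def has_123(nums):
--     # single pass, rolling window of the last two values (state machine)
--     a = b = None
--     for n in nums:
--         if a == 1 and b == 2 and n == 3:
--             return True
--         a, b = b, n
--     return False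
-- ===== Notes on version B (the rewrite author's own statement) =====
-- stated objective: simpler
-- what changed: Replaced the enumerate-and-re-index window check (an inner verification loop reading nums at index plus offset) by a single pass that keeps a rolling pair of the two previous values and tests the current triple directly.
import Mathlib
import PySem

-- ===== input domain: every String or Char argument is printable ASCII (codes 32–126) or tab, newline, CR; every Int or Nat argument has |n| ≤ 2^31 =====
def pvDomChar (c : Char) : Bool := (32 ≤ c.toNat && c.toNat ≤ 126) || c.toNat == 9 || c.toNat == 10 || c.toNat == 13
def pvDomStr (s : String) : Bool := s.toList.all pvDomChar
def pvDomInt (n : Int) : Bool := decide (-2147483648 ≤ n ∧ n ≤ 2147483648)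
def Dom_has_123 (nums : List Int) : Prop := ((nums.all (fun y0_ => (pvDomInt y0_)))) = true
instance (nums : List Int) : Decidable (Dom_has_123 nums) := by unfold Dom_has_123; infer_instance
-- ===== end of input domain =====

-- B replaces A's window re-indexing (inner loop over enumerate(range(1,4)) reading nums[index+k])
-- by a single pass with a rolling pair of previous values: simpler, same O(n) cost.

-- ===== PORT A =====
-- inner loop: 'for check_index, check in enumerate(range(start, end+1)): valid = valid and check == nums[index+check_index]'
-- the guard 'index + 3 <= len(nums)' in the caller keeps every access in range, so pyGetD with
-- default 0 is exact wherever this is invoked.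
def has123_inner (nums : List Int) (index : Int) : Bool :=
  (PySem.List.enumerate (PySem.List.pyRange 1 (3 + 1) 1) 0).foldl
    (fun valid p => valid && (p.2 == PySem.List.pyGetD nums (index + p.1) 0)) true

-- 'for index, number in enumerate(nums): …' with the two continue-guards and the early return
def has123_loop (nums : List Int) : List (Int × Int) → Bool
  | [] => false
  | (index, number) :: rest =>
    if number ≠ 1 then has123_loop nums rest
    else if index + 3 > (nums.length : Int) then has123_loop nums rest
    else if has123_inner nums index then true
    else has123_loop nums rest

def has_123 (nums : List Int) : Bool :=
  has123_loop nums (PySem.List.enumerate nums 0)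

-- ===== PORT B =====
-- 'a = b = None; for n in nums: if a == 1 and b == 2 and n == 3: return True; a, b = b, n; return False'
def has123_alt_loop : Option Int → Option Int → List Int → Bool
  | _, _, [] => false
  | a, b, n :: rest =>
    if a == some 1 && b == some 2 && n == 3 then true
    else has123_alt_loop b (some n) rest

def has_123_alt (nums : List Int) : Bool :=
  has123_alt_loop none none nums

-- ===== PRECONDITION & SPEC =====
def Spec_has_123 (nums : List Int) (out : Bool) : Prop := out = has_123_alt nums
instance (nums : List Int) (out : Bool) : Decidable (Spec_has_123 nums out) := by unfold Spec_has_123; infer_instance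

-- ===== CLAIM (what is proved, stated in full; the proofs are below) =====
def Claim_equal_has_123 : Prop := ∀ (nums : List Int), Dom_has_123 nums → Spec_has_123 nums (has_123 nums)

-- ===== LEMMAS AND PROOFS =====

-- common characterisation: does the list start with / contain a consecutive 1,2,3
def win : List Int → Bool
  | a :: b :: c :: t => (a == 1 && b == 2 && c == 3) || win (b :: c :: t)
  | _ => false

theorem win_short (l : List Int) (h : l.length < 3) : win l = false := by
  match l with
  | [] => rfl
  | [_] => rfl
  | [_, _] => rfl
  | _ :: _ :: _ :: _ => simp at h; omega

theorem win_cons_ne (n : Int) (l : List Int) (h : n ≠ 1) : win (n :: l) = win l := by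
  match l with
  | [] => rfl
  | [b] => rfl
  | b :: c :: t =>
    show ((n == 1 && b == 2 && c == 3) || win (b :: c :: t)) = win (b :: c :: t)
    simp [h]

theorem beq_swap (x y : Int) : decide (x = y) = (y == x) := by
  rcases eq_or_ne x y with h | h
  · subst h; simp
  · simp [h, Ne.symm h]

theorem balt_some (x y : Int) (l : List Int) :
    has123_alt_loop (some x) (some y) l = win (x :: y :: l) := by
  induction l generalizing x y with
  | nil => rfl
  | cons n rest ih =>
    show (if x == 1 && y == 2 && n == 3 then true else has123_alt_loop (some y) (some n) rest)
        = ((x == 1 && y == 2 && n == 3) || win (y :: n :: rest))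
    rw [ih]
    by_cases h : (x == 1 && y == 2 && n == 3) = true <;> simp [h]

theorem balt_none1 (y : Int) (l : List Int) :
    has123_alt_loop none (some y) l = win (y :: l) := by
  match l with
  | [] => rfl
  | n :: rest =>
    show has123_alt_loop (some y) (some n) rest = win (y :: n :: rest)
    exact balt_some y n rest

theorem balt_none (l : List Int) : has123_alt_loop none none l = win l := by
  match l with
  | [] => rfl
  | n :: rest =>
    show has123_alt_loop none (some n) rest = win (n :: rest)
    exact balt_none1 n rest

theorem inner_eval (nums : List Int) (k : Int) :
    has123_inner nums k =
      ((1 : Int) == PySem.List.pyGetD nums (k + 0) 0 &&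
       ((2 : Int) == PySem.List.pyGetD nums (k + 1) 0) &&
       ((3 : Int) == PySem.List.pyGetD nums (k + 2) 0)) := by
  have h : PySem.List.enumerate (PySem.List.pyRange 1 4) =
      [((0 : Int), (1 : Int)), (1, 2), (2, 3)] := by decide
  simp only [has123_inner]
  norm_num [h, List.foldl, Bool.and_assoc]

theorem getD_mid (pre l : List Int) (j : Nat) :
    PySem.List.pyGetD (pre ++ l) ((pre.length : Int) + (j : Int)) 0 = l.getD j 0 := by
  have : ((pre.length : Int) + (j : Int)) = ((pre.length + j : Nat) : Int) := by push_cast; ring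
  rw [this, PySem.List.pyGetD_natCast]
  simp [List.getD, List.getElem?_append_right]

theorem aLoop_eq (rest pre : List Int) :
    has123_loop (pre ++ rest) (PySem.List.enumerate rest (pre.length : Int)) = win rest := by
  induction rest generalizing pre with
  | nil => simp [has123_loop, PySem.List.enumerate, win]
  | cons n rest' ih =>
    have ih' := ih (pre ++ [n])
    have hassoc : (pre ++ [n]) ++ rest' = pre ++ n :: rest' := by simp
    have hlen : (((pre ++ [n]).length : Nat) : Int) = (pre.length : Int) + 1 := by
      simp
    rw [hassoc, hlen] at ih'
    rw [PySem.List.enumerate_cons]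
    show (if n ≠ 1 then _ else if (pre.length : Int) + 3 > ((pre ++ n :: rest').length : Int)
          then _ else if has123_inner (pre ++ n :: rest') (pre.length : Int) then true else _)
        = win (n :: rest')
    by_cases h1 : n = 1
    · subst h1
      simp only [ne_eq, not_true_eq_false, if_false]
      by_cases h2 : (pre.length : Int) + 3 > ((pre ++ (1 : Int) :: rest').length : Int)
      · rw [if_pos h2, ih']
        have hl : rest'.length < 2 := by simp at h2; omega
        rw [win_short rest' (by omega)]
        exact (win_short _ (by simp; omega)).symm
      · rw [if_neg h2]
        have hl : 2 ≤ rest'.length := by simp at h2; omega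
        match rest', hl with
        | b :: c :: t, _ =>
          rw [inner_eval]
          have g0 := getD_mid pre ((1:Int) :: b :: c :: t) 0
          have g1 := getD_mid pre ((1:Int) :: b :: c :: t) 1
          have g2 := getD_mid pre ((1:Int) :: b :: c :: t) 2
          simp only [Nat.cast_zero, Nat.cast_one, Nat.cast_ofNat] at g0 g1 g2
          rw [g0, g1, g2]
          simp only [List.getD]
          show (if ((1:Int) == 1 && (2 == b) && (3 == c)) = true then true
                else has123_loop (pre ++ (1:Int) :: b :: c :: t)
                  (PySem.List.enumerate (b :: c :: t) ((pre.length : Int) + 1)))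
              = win ((1:Int) :: b :: c :: t)
          rw [ih']
          show _ = (((1:Int) == 1 && b == 2 && c == 3) || win (b :: c :: t))
          by_cases hb : b = 2 <;> by_cases hc : c = 3 <;> simp [hb, hc, beq_swap]
    · simp only [ne_eq, h1, not_false_eq_true, if_true]
      rw [ih', win_cons_ne n rest' h1]

-- ===== VERDICT (by name: the statement is the Claim_ definition above) =====
theorem has_123_spec : Claim_equal_has_123 := by
  intro nums _
  show has_123 nums = has_123_alt nums
  have := aLoop_eq nums []
  simpa [has_123, has_123_alt, balt_none] using this
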